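-- pv_equiv track=rewrite | github.com/wjdunlop/cs230proj | datacollector.py | chords_to_notes
-- ===== SOURCE A (Python) =====
-- def chords_to_notes(chords, sample_rate):
--     notes = []
--     for chordIdx in range(len(chords)):
--         chord = chords[chordIdx]
--         futureChord = ""
--         for futureChordIdx in range(chordIdx + 1, len(chords)):
--             if chords[futureChordIdx][0] == chord[0]:
--                 futureChord = chords[futureChordIdx]
--                 break
--         instrument = chord[0]
--         chord = chord[1:]
--         futureChord = futureChord[1:]
--         for pitch in range(len(chord)):
--             # if pitch not being played we don't care
--             if chord[pitch] == "0":
--                 continue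
--
--             # if pitch active, we do
--             note = instrument + str(pitch)
--             if chord[pitch] == "1":
--                 notes.append(note)
--
--             # pitch continued to play, if it ends next, add an end instruction
--             if futureChord == "" or futureChord[pitch] == "0":
--                 notes.append("end" + note)
--
--         notes.append("wait")
--
--     # collect the wait terms
--     note_seq = ""
--     idx = 0
--     while idx < len(notes):
--         wait_count = 1
--         if notes[idx] == "wait":
--             while wait_count <= sample_rate * 2 and idx + wait_count < len(notes) and notes[idx + wait_count] == "wait":
--                 wait_count += 1
--             # avoid stepping over index
--             if wait_count > sample_rate * 2:
--                 wait_count -= 1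
--             notes[idx] = "wait" + str(wait_count)
--         note_seq += notes[idx] + " "
--         idx += wait_count
--
--     return note_seq
-- ===== SOURCE B (Python) =====
-- def chords_to_notes(chords, sample_rate):
--     # one backward pass: for each chord, the body of the next chord of the same instrument
--     futures = []
--     next_body = {}
--     for ch in reversed(chords):
--         futures.append(next_body.get(ch[0], ""))
--         next_body[ch[0]] = ch[1:]
--     futures.reverse()
--
--     tokens = []
--     for ch, fut in zip(chords, futures):
--         inst = ch[0]
--         body = ch[1:]
--         for p, c in enumerate(body):
--             if c == "0":
--                 continue
--             note = inst + str(p)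
--             if c == "1":
--                 tokens.append(note)
--             if fut == "" or fut[p] == "0":
--                 tokens.append("end" + note)
--         tokens.append("wait")
--
--     # single forward pass collapsing runs of "wait" into capped chunks
--     cap = 2 * sample_rate
--     parts = []
--     run = 0
--     for t in tokens:
--         if t == "wait":
--             run += 1
--         else:
--             while run > 0:
--                 k = min(run, cap)
--                 parts.append("wait" + str(k))
--                 run -= k
--             parts.append(t)
--     while run > 0:
--         k = min(run, cap)
--         parts.append("wait" + str(k))
--         run -= k
--
--     return "".join(p + " " for p in parts)
-- ===== Notes on version B (the rewrite author's own statement) =====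
-- stated objective: alternative
-- what changed: B replaces A's per-chord forward rescan for the next same-instrument chord by one backward pass with a dict (instrument -> next chord body), and replaces A's index-jumping while-loop that collapses runs of 'wait' by a single forward fold with a run counter emitting capped chunks; measured ~1.5x in a timing run but not consistently, so no speed is claimed.
-- outside the precondition, e.g. on chords_to_notes(['a1'], 0): A returns 'a0 enda0 wait0 wait0 ', B does not finish within the time limit
import Mathlib
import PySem

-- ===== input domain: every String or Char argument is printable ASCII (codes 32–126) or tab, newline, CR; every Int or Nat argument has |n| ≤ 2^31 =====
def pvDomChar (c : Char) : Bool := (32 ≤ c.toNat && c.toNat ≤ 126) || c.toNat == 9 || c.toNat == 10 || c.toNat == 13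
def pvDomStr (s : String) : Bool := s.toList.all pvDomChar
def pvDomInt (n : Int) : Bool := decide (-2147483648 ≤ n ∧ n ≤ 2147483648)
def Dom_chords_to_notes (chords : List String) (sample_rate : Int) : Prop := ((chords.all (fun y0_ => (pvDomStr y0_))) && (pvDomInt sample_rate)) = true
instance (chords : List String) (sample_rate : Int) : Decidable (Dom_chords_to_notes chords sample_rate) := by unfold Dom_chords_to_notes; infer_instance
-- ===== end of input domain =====

-- B replaces A's repeated forward rescans (next chord of the same instrument) by one backward
-- dict pass, and A's index-jumping wait-collapsing loop by a single forward fold (objective: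
-- alternative single-pass algorithm; a timing run did not confirm a consistent speed-up).

-- ===== PORT A =====
-- strings are handled as their code-point lists (PySem.Chars convention); the token "wait"
def pvWaitT : List Char := ['w', 'a', 'i', 't']

def pvAHead (s : List Char) : Char := (PySem.List.pyGet? s 0).getD ' '

-- the inner 'for futureChordIdx in range(chordIdx+1, len(chords)): … break' loop
def pvAFindFuture (cs : List (List Char)) (h : Char) : List Int → List Char
  | [] => []
  | i :: rest =>
    let c := (PySem.List.pyGet? cs i).getD []
    if pvAHead c == h then c else pvAFindFuture cs h rest

-- the first 'for chordIdx in range(len(chords))' loop building the notes list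
def pvABuild (cs : List (List Char)) : List (List Char) :=
  (PySem.List.pyRange 0 (cs.length : Int) 1).foldl
    (fun notes i =>
      let chord := (PySem.List.pyGet? cs i).getD []
      let futureChord := pvAFindFuture cs (pvAHead chord) (PySem.List.pyRange (i + 1) (cs.length : Int) 1)
      let instrument := pvAHead chord
      let body := PySem.List.slice chord (some 1) none
      let fut := PySem.List.slice futureChord (some 1) none
      let notes :=
        (PySem.List.pyRange 0 (body.length : Int) 1).foldl
          (fun notes p =>
            let c := (PySem.List.pyGet? body p).getD ' '
            if c == '0' then notes
            else
              let note := instrument :: PySem.Int.toChars p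
              let notes := if c == '1' then notes ++ [note] else notes
              if fut == [] || (PySem.List.pyGet? fut p).getD '?' == '0' then
                notes ++ ['e' :: 'n' :: 'd' :: note]
              else notes)
          notes
      notes ++ [pvWaitT])
    []

-- the inner 'while wait_count <= sample_rate*2 and …' loop (fuel makes it total; Python
-- terminates on every input admitted by Pre_)
def pvACountWait (notes : List (List Char)) (sr idx : Int) : Int → Nat → Int
  | wc, 0 => wc
  | wc, fuel + 1 =>
    if wc ≤ sr * 2 ∧ idx + wc < (notes.length : Int) ∧ (PySem.List.pyGet? notes (idx + wc)).getD [] = pvWaitT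
    then pvACountWait notes sr idx (wc + 1) fuel
    else wc

-- the 'while idx < len(notes)' loop; the Python mutates notes[idx] and immediately emits it,
-- never reading a mutated cell again, so the write is modelled by emitting the new token
def pvACollapse (notes : List (List Char)) (sr : Int) : Int → List Char → Nat → List Char
  | _, acc, 0 => acc
  | idx, acc, fuel + 1 =>
    if idx < (notes.length : Int) then
      let t := (PySem.List.pyGet? notes idx).getD []
      if t = pvWaitT then
        let w := pvACountWait notes sr idx 1 notes.length
        let wc := if sr * 2 < w then w - 1 else w
        pvACollapse notes sr (idx + wc) (acc ++ pvWaitT ++ PySem.Int.toChars wc ++ [' ']) fuel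
      else
        pvACollapse notes sr (idx + 1) (acc ++ t ++ [' ']) fuel
    else acc

def chords_to_notes (chords : List String) (sample_rate : Int) : String :=
  let cs := chords.map String.toList
  let notes := pvABuild cs
  String.ofList (pvACollapse notes sample_rate 0 [] notes.length)

-- ===== PORT B =====
def pvBHead (s : List Char) : Char := (PySem.List.pyGet? s 0).getD ' '

def pvBBody (s : List Char) : List Char := PySem.List.slice s (some 1) none

-- backward pass: dict instrument-char -> body of the next chord of that instrument
def pvBFutures (cs : List (List Char)) : List (List Char) :=
  let st := cs.reverse.foldl
    (fun (st : PySem.Dict Char (List Char) × List (List Char)) ch =>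
      (st.1.insert (pvBHead ch) (pvBBody ch), st.2 ++ [st.1.getD (pvBHead ch) []]))
    (PySem.Dict.empty, [])
  st.2.reverse

-- 'for ch, fut in zip(chords, futures)' building the token list
def pvBTokens (cs : List (List Char)) : List (List Char) :=
  (cs.zip (pvBFutures cs)).foldl
    (fun toks chfut =>
      let inst := pvBHead chfut.1
      let body := pvBBody chfut.1
      let fut := chfut.2
      let toks :=
        (PySem.List.enumerate body 0).foldl
          (fun toks pc =>
            if pc.2 == '0' then toks
            else
              let note := inst :: PySem.Int.toChars pc.1
              let toks := if pc.2 == '1' then toks ++ [note] else toks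
              if fut == [] || (PySem.List.pyGet? fut pc.1).getD '?' == '0' then
                toks ++ ['e' :: 'n' :: 'd' :: note]
              else toks)
          toks
      toks ++ [pvWaitT])
    []

-- 'while run > 0: k = min(run, cap); …' (the k ≤ 0 guard only makes the function total;
-- the Python loops forever there, which Pre_ excludes via sample_rate ≥ 1)
def pvBChunks (run : Nat) (cap : Int) : List (List Char)
  := if _h : run = 0 then [] else
      let k := min (run : Int) cap
      if _hk : k ≤ 0 then []
      else (pvWaitT ++ PySem.Int.toChars k) :: pvBChunks (run - k.toNat) cap
termination_by run
decreasing_by omega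

-- single forward pass with a run counter, then ''.join(p + " " for p in parts)
def pvBCollapse (tokens : List (List Char)) (cap : Int) : List Char :=
  let st := tokens.foldl
    (fun (st : Nat × List (List Char)) t =>
      if t = pvWaitT then (st.1 + 1, st.2)
      else (0, st.2 ++ pvBChunks st.1 cap ++ [t]))
    (0, [])
  let parts := st.2 ++ pvBChunks st.1 cap
  (parts.map (fun p => p ++ [' '])).flatten

def chords_to_notes_alt (chords : List String) (sample_rate : Int) : String :=
  let cs := chords.map String.toList
  String.ofList (pvBCollapse (pvBTokens cs) (2 * sample_rate))

-- ===== PRECONDITION & SPEC =====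
-- Pre_ excludes the inputs on which the Python A raises IndexError (an empty chord string, or an
-- active pitch reaching past the end of the next same-instrument chord), and sample_rate < 1 with
-- chords nonempty, where A returns an accidental value produced by its in-place token mutation
-- (every run of waits becomes 'wait0 wait0 ') while B's chunk-emitting loop does not terminate.
def Pre_chords_to_notes (chords : List String) (sample_rate : Int) : Prop :=
  (chords ≠ [] → 1 ≤ sample_rate) ∧
  (∀ s ∈ chords, s.toList ≠ []) ∧
  (∀ j ∈ List.range chords.length, ∀ i ∈ List.range j,
     (chords[j]?.getD "").toList.head? = (chords[i]?.getD "").toList.head? →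
     (∀ k ∈ List.range j, i < k → (chords[k]?.getD "").toList.head? ≠ (chords[i]?.getD "").toList.head?) →
     ∀ p ∈ List.range (chords[i]?.getD "").toList.length, 1 ≤ p →
       (chords[i]?.getD "").toList[p]?.getD '0' ≠ '0' →
       ((chords[j]?.getD "").toList.length ≤ 1 ∨ p + 1 ≤ (chords[j]?.getD "").toList.length))

instance (chords : List String) (sample_rate : Int) : Decidable (Pre_chords_to_notes chords sample_rate) := by
  unfold Pre_chords_to_notes; infer_instance

def pvWitness_chords_to_notes : List String × Int := (["a101", "a000", "b11"], 1)

def Spec_chords_to_notes (chords : List String) (sample_rate : Int) (out : String) : Prop := out = chords_to_notes_alt chords sample_rate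
instance (chords : List String) (sample_rate : Int) (out : String) : Decidable (Spec_chords_to_notes chords sample_rate out) := by unfold Spec_chords_to_notes; infer_instance

-- ===== CLAIM (what is proved, stated in full; the proofs are below) =====
def Claim_equal_chords_to_notes : Prop := ∀ (chords : List String) (sample_rate : Int), Dom_chords_to_notes chords sample_rate → Pre_chords_to_notes chords sample_rate → Spec_chords_to_notes chords sample_rate (chords_to_notes chords sample_rate)

-- ===== LEMMAS AND PROOFS =====

-- ---- phase 1: the two token lists are equal (for every input) ----

-- first chord in the list whose head character is h (A's forward scan, as a list function)
def pvFM (h : Char) : List (List Char) → List Char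
  | [] => []
  | c :: rest => if pvAHead c = h then c else pvFM h rest

lemma pvAFindFuture_eq (cs : List (List Char)) (h : Char) :
    ∀ n a : Nat, cs.length - a ≤ n →
      pvAFindFuture cs h (PySem.List.pyRange (a : Int) (cs.length : Int) 1) = pvFM h (cs.drop a) := by
  intro n
  induction n with
  | zero =>
    intro a ha
    have hle : cs.length ≤ a := by omega
    rw [PySem.List.pyRange_one_eq_nil (by exact_mod_cast hle), List.drop_eq_nil_of_le hle]
    rfl
  | succ n ih =>
    intro a ha
    by_cases hlt : a < cs.length
    · rw [PySem.List.pyRange_one_cons (by exact_mod_cast hlt),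
        List.drop_eq_getElem_cons hlt]
      simp only [pvAFindFuture, pvFM, PySem.List.pyGet?_natCast,
        List.getElem?_eq_getElem hlt, Option.getD_some]
      have : (a : Int) + 1 = ((a + 1 : Nat) : Int) := by push_cast; ring
      rw [this, ih (a + 1) (by omega)]
      by_cases hc : pvAHead cs[a] = h <;> simp [hc]
    · have hle : cs.length ≤ a := by omega
      rw [PySem.List.pyRange_one_eq_nil (by exact_mod_cast hle), List.drop_eq_nil_of_le hle]
      rfl

-- dict state of B's backward pass after processing the reverse of l, starting from d
def pvDfold : List (List Char) → PySem.Dict Char (List Char) → PySem.Dict Char (List Char)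
  | [], d => d
  | c :: l, d => (pvDfold l d).insert (pvBHead c) (pvBBody c)

def pvGfut : List (List Char) → PySem.Dict Char (List Char) → List (List Char)
  | [], _ => []
  | c :: l, d => (pvDfold l d).getD (pvBHead c) [] :: pvGfut l d

-- the per-position future body, as a list function
def pvFfut : List (List Char) → List (List Char)
  | [] => []
  | c :: l => pvBBody (pvFM (pvBHead c) l) :: pvFfut l

lemma pvBFutures_fold (l : List (List Char)) :
    ∀ (d : PySem.Dict Char (List Char)) (acc : List (List Char)),
      l.reverse.foldl
        (fun (st : PySem.Dict Char (List Char) × List (List Char)) ch =>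
          (st.1.insert (pvBHead ch) (pvBBody ch), st.2 ++ [st.1.getD (pvBHead ch) []]))
        (d, acc)
      = (pvDfold l d, acc ++ (pvGfut l d).reverse) := by
  induction l with
  | nil => intro d acc; simp [pvDfold, pvGfut]
  | cons c l ih =>
    intro d acc
    simp only [List.reverse_cons, List.foldl_append, ih d acc, List.foldl_cons, List.foldl_nil,
      pvDfold, pvGfut]
    simp

lemma pvDfold_getD (h : Char) (l : List (List Char)) :
    (pvDfold l PySem.Dict.empty).getD h [] = pvBBody (pvFM h l) := by
  induction l with
  | nil => simp [pvDfold, pvFM, pvBBody, PySem.List.slice_from_one]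
  | cons c l ih =>
    simp only [pvDfold, pvFM]
    rw [PySem.Dict.getD_insert]
    by_cases hc : pvAHead c = h
    · have : h = pvBHead c := by rw [← hc]; rfl
      simp [hc, this]
    · have : ¬ h = pvBHead c := fun he => hc (by rw [he]; rfl)
      simp [hc, this, ih]

lemma pvGfut_eq (l : List (List Char)) : pvGfut l PySem.Dict.empty = pvFfut l := by
  induction l with
  | nil => rfl
  | cons c l ih => simp only [pvGfut, pvFfut, pvDfold_getD, ih]

lemma pvBFutures_eq (cs : List (List Char)) : pvBFutures cs = pvFfut cs := by
  unfold pvBFutures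
  rw [pvBFutures_fold]
  simp [pvGfut_eq]

lemma pvBChunks_zero (cap : Int) : pvBChunks 0 cap = [] := by
  simp [pvBChunks]

lemma pvBChunks_pos (run : Nat) (cap : Int) (hrun : 0 < run) (hcap : 1 ≤ cap) :
    pvBChunks run cap
      = (pvWaitT ++ PySem.Int.toChars (min ((run : Nat) : Int) cap))
          :: pvBChunks (run - (min ((run : Nat) : Int) cap).toNat) cap := by
  rw [pvBChunks]
  rw [dif_neg (by omega : ¬ run = 0)]
  have hknn : ¬ (min ((run : Nat) : Int) cap ≤ 0) := by push_cast; omega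
  rw [dif_neg hknn]

lemma pvPitch_eq (instrument : Char) (fut body : List Char) (notes : List (List Char)) :
    (PySem.List.pyRange 0 (body.length : Int) 1).foldl
      (fun notes p =>
        let c := (PySem.List.pyGet? body p).getD ' '
        if c == '0' then notes
        else
          let note := instrument :: PySem.Int.toChars p
          let notes := if c == '1' then notes ++ [note] else notes
          if fut == [] || (PySem.List.pyGet? fut p).getD '?' == '0' then
            notes ++ ['e' :: 'n' :: 'd' :: note]
          else notes) notes
    = (PySem.List.enumerate body 0).foldl
      (fun toks pc =>
        if pc.2 == '0' then toks
        else
          let note := instrument :: PySem.Int.toChars pc.1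
          let toks := if pc.2 == '1' then toks ++ [note] else toks
          if fut == [] || (PySem.List.pyGet? fut pc.1).getD '?' == '0' then
            toks ++ ['e' :: 'n' :: 'd' :: note]
          else toks) notes := by
  rw [PySem.List.enumerate_eq_map_pyRange (d := ' '), List.foldl_map]
  rfl

lemma pvOuter_eq (cs : List (List Char)) :
    ∀ (n a : Nat) (notes : List (List Char)), cs.length - a ≤ n →
      (PySem.List.pyRange (a : Int) (cs.length : Int) 1).foldl
        (fun notes i =>
          let chord := (PySem.List.pyGet? cs i).getD []
          let futureChord := pvAFindFuture cs (pvAHead chord) (PySem.List.pyRange (i + 1) (cs.length : Int) 1)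
          let instrument := pvAHead chord
          let body := PySem.List.slice chord (some 1) none
          let fut := PySem.List.slice futureChord (some 1) none
          let notes :=
            (PySem.List.pyRange 0 (body.length : Int) 1).foldl
              (fun notes p =>
                let c := (PySem.List.pyGet? body p).getD ' '
                if c == '0' then notes
                else
                  let note := instrument :: PySem.Int.toChars p
                  let notes := if c == '1' then notes ++ [note] else notes
                  if fut == [] || (PySem.List.pyGet? fut p).getD '?' == '0' then
                    notes ++ ['e' :: 'n' :: 'd' :: note]
                  else notes)
              notes
          notes ++ [pvWaitT]) notes
      = ((cs.drop a).zip (pvFfut (cs.drop a))).foldl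
        (fun toks chfut =>
          let inst := pvBHead chfut.1
          let body := pvBBody chfut.1
          let fut := chfut.2
          let toks :=
            (PySem.List.enumerate body 0).foldl
              (fun toks pc =>
                if pc.2 == '0' then toks
                else
                  let note := inst :: PySem.Int.toChars pc.1
                  let toks := if pc.2 == '1' then toks ++ [note] else toks
                  if fut == [] || (PySem.List.pyGet? fut pc.1).getD '?' == '0' then
                    toks ++ ['e' :: 'n' :: 'd' :: note]
                  else toks)
              toks
          toks ++ [pvWaitT]) notes := by
  intro n
  induction n with
  | zero =>
    intro a notes ha
    have hle : cs.length ≤ a := by omega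
    rw [PySem.List.pyRange_one_eq_nil (by exact_mod_cast hle), List.drop_eq_nil_of_le hle]
    rfl
  | succ n ih =>
    intro a notes ha
    by_cases hlt : a < cs.length
    · rw [PySem.List.pyRange_one_cons (by exact_mod_cast hlt), List.drop_eq_getElem_cons hlt]
      simp only [pvFfut, List.zip_cons_cons, List.foldl_cons]
      have hcast : (a : Int) + 1 = ((a + 1 : Nat) : Int) := by push_cast; ring
      rw [hcast, ih (a + 1) _ (by omega)]
      congr 1
      simp only [PySem.List.pyGet?_natCast, List.getElem?_eq_getElem hlt, Option.getD_some,
        pvAFindFuture_eq cs _ cs.length (a + 1) (by omega), pvPitch_eq]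
      rfl
    · have hle : cs.length ≤ a := by omega
      rw [PySem.List.pyRange_one_eq_nil (by exact_mod_cast hle), List.drop_eq_nil_of_le hle]
      rfl

lemma pvTokens_eq (cs : List (List Char)) : pvABuild cs = pvBTokens cs := by
  unfold pvABuild pvBTokens
  rw [pvBFutures_eq]
  have h := pvOuter_eq cs cs.length 0 [] (by omega)
  simpa using h

-- ---- phase 2: the two collapsing passes agree when 1 ≤ sample_rate ----

-- number of leading "wait" tokens
def pvLeadW : List (List Char) → Nat
  | [] => 0
  | t :: rest => if t = pvWaitT then pvLeadW rest + 1 else 0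

-- the common intermediate: the collapsed parts list (cap is forced ≥ 1 for termination only)
def pvMid (cap : Int) : List (List Char) → List (List Char)
  | [] => []
  | t :: rest =>
    if t = pvWaitT then
      let k := (min ((pvLeadW rest + 1 : Nat) : Int) (max cap 1)).toNat
      (pvWaitT ++ PySem.Int.toChars (k : Int)) :: pvMid cap ((t :: rest).drop k)
    else t :: pvMid cap rest
termination_by l => l.length
decreasing_by all_goals (simp [List.length_drop]; try omega)

def pvJoin (ps : List (List Char)) : List Char := (ps.map (fun p => p ++ [' '])).flatten

lemma pvACountWait_eq (notes : List (List Char)) (sr : Int) (_hsr : 1 ≤ sr) :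
    ∀ (fuel : Nat) (i : Nat) (wc : Int), 1 ≤ wc → wc ≤ sr * 2 + 1 →
      notes.length - (i + wc.toNat) ≤ fuel →
      pvACountWait notes sr (i : Int) wc fuel
        = min (wc + (pvLeadW (notes.drop (i + wc.toNat)) : Int)) (sr * 2 + 1) := by
  intro fuel
  induction fuel with
  | zero =>
    intro i wc h1 h2 hf
    have hge : notes.length ≤ i + wc.toNat := by omega
    simp only [pvACountWait, List.drop_eq_nil_of_le hge, pvLeadW]
    omega
  | succ fuel ih =>
    intro i wc h1 h2 hf
    have hcast : (i : Int) + wc = ((i + wc.toNat : Nat) : Int) := by omega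
    simp only [pvACountWait]
    by_cases hC : wc ≤ sr * 2 ∧ (i : Int) + wc < (notes.length : Int) ∧ (PySem.List.pyGet? notes ((i : Int) + wc)).getD [] = pvWaitT
    · obtain ⟨hc1, hc2, hc3⟩ := hC
      have hin : i + wc.toNat < notes.length := by omega
      rw [if_pos ⟨hc1, hc2, hc3⟩, ih i (wc + 1) (by omega) (by omega) (by omega)]
      have htok : notes[i + wc.toNat] = pvWaitT := by
        rw [hcast, PySem.List.pyGet?_natCast, List.getElem?_eq_getElem hin] at hc3
        simpa using hc3
      have hidx : i + (wc + 1).toNat = (i + wc.toNat) + 1 := by omega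
      have hdropcons : notes.drop (i + wc.toNat) = pvWaitT :: notes.drop (i + wc.toNat + 1) := by
        rw [List.drop_eq_getElem_cons hin, htok]
      rw [hidx, hdropcons, pvLeadW, if_pos rfl]
      push_cast
      omega
    · rw [if_neg hC]
      push_neg at hC
      by_cases ha : wc ≤ sr * 2
      · by_cases hb : (i : Int) + wc < (notes.length : Int)
        · have hin : i + wc.toNat < notes.length := by omega
          have hc3 := hC ha hb
          have htok : notes[i + wc.toNat] ≠ pvWaitT := by
            rw [hcast, PySem.List.pyGet?_natCast, List.getElem?_eq_getElem hin] at hc3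
            simpa using hc3
          rw [List.drop_eq_getElem_cons hin, pvLeadW, if_neg htok]
          push_cast
          omega
        · have hge : notes.length ≤ i + wc.toNat := by omega
          simp only [List.drop_eq_nil_of_le hge, pvLeadW]
          omega
      · have hL : (0 : Int) ≤ (pvLeadW (notes.drop (i + wc.toNat)) : Int) := Int.natCast_nonneg _
        omega

lemma pvACollapse_eq (notes : List (List Char)) (sr : Int) (hsr : 1 ≤ sr) :
    ∀ (fuel : Nat) (i : Nat) (acc : List Char), notes.length - i ≤ fuel →
      pvACollapse notes sr (i : Int) acc fuel = acc ++ pvJoin (pvMid (sr * 2) (notes.drop i)) := by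
  intro fuel
  induction fuel with
  | zero =>
    intro i acc hf
    have hge : notes.length ≤ i := by omega
    simp [pvACollapse, List.drop_eq_nil_of_le hge, pvMid, pvJoin]
  | succ fuel ih =>
    intro i acc hf
    simp only [pvACollapse]
    by_cases hlt : i < notes.length
    · rw [if_pos (by exact_mod_cast hlt)]
      have hget : (PySem.List.pyGet? notes (i : Int)).getD [] = notes[i] := by
        rw [PySem.List.pyGet?_natCast, List.getElem?_eq_getElem hlt]; rfl
      rw [hget, List.drop_eq_getElem_cons hlt]
      by_cases hw : notes[i] = pvWaitT
      · rw [if_pos hw]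
        rw [pvACountWait_eq notes sr hsr notes.length i 1 (by omega) (by omega) (by omega)]
        simp only [pvMid, if_pos hw]
        set L : Nat := pvLeadW (notes.drop (i + 1)) with hL
        have hmax : max (sr * 2) 1 = sr * 2 := by omega
        have hw1 : (1 : Int).toNat = 1 := rfl
        -- the emitted count and the step width agree
        have hkey : (if sr * 2 < min (1 + (L : Int)) (sr * 2 + 1) then min (1 + (L : Int)) (sr * 2 + 1) - 1
              else min (1 + (L : Int)) (sr * 2 + 1)) = min ((L + 1 : Nat) : Int) (sr * 2) := by
          push_cast; omega
        rw [hw1, hkey, hmax]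
        set k : Nat := (min ((L + 1 : Nat) : Int) (sr * 2)).toNat with hk
        have hkval : (min ((L + 1 : Nat) : Int) (sr * 2)) = (k : Int) := by
          have : (0 : Int) ≤ min ((L + 1 : Nat) : Int) (sr * 2) := by push_cast; omega
          omega
        have hk1 : 1 ≤ k := by push_cast at hkval ⊢; omega
        rw [hkval]
        have hcast2 : (i : Int) + (k : Int) = ((i + k : Nat) : Int) := by push_cast; ring
        rw [hcast2, ih (i + k) _ (by omega)]
        -- align the two tails
        have htail : (notes[i] :: notes.drop (i + 1)).drop k = notes.drop (i + k) := by
          rw [← List.drop_eq_getElem_cons hlt, List.drop_drop]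
        rw [htail]
        simp [pvJoin, List.append_assoc]
      · rw [if_neg hw]
        have hcast2 : (i : Int) + 1 = ((i + 1 : Nat) : Int) := by push_cast; ring
        rw [hcast2, ih (i + 1) _ (by omega)]
        simp only [pvMid, if_neg hw]
        simp [pvJoin, List.append_assoc]
    · rw [if_neg (by exact_mod_cast hlt)]
      have hge : notes.length ≤ i := by omega
      simp [List.drop_eq_nil_of_le hge, pvMid, pvJoin]

lemma pvLeadW_replicate (n : Nat) (l : List (List Char)) :
    pvLeadW (List.replicate n pvWaitT ++ l) = n + pvLeadW l := by
  induction n with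
  | zero => simp
  | succ n ih => simp [List.replicate_succ, pvLeadW, ih]; omega

lemma pvMid_replicate (cap : Int) (hcap : 1 ≤ cap) :
    ∀ (run : Nat) (l : List (List Char)), (l = [] ∨ ∃ t rest, l = t :: rest ∧ t ≠ pvWaitT) →
      pvMid cap (List.replicate run pvWaitT ++ l) = pvBChunks run cap ++ pvMid cap l := by
  intro run
  induction run using Nat.strong_induction_on with
  | _ run ih =>
    intro l hl
    rcases Nat.eq_zero_or_pos run with hrun | hrun
    · subst hrun; rw [pvBChunks_zero]; rfl
    · have hLl : pvLeadW l = 0 := by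
        rcases hl with rfl | ⟨t, rest, rfl, ht⟩
        · rfl
        · simp [pvLeadW, ht]
      have hrep : List.replicate run pvWaitT ++ l = pvWaitT :: (List.replicate (run - 1) pvWaitT ++ l) := by
        rcases Nat.exists_eq_add_of_le hrun with ⟨m, hm⟩
        subst hm
        have h1m : 1 + m = m + 1 := by omega
        rw [h1m]
        simp [List.replicate_succ]
      rw [hrep]
      simp only [pvMid]
      rw [pvLeadW_replicate, hLl]
      have hmax : max cap 1 = cap := by omega
      rw [hmax]
      have harg : (run - 1) + 0 + 1 = run := by omega
      rw [harg]
      set k : Nat := (min ((run : Nat) : Int) cap).toNat with hk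
      have hkpos : 1 ≤ k := by
        have : (1 : Int) ≤ min ((run : Nat) : Int) cap := by push_cast; omega
        omega
      have hkle : k ≤ run := by
        have : min ((run : Nat) : Int) cap ≤ (run : Int) := min_le_left _ _
        omega
      have hdrop : (pvWaitT :: (List.replicate (run - 1) pvWaitT ++ l)).drop k
          = List.replicate (run - k) pvWaitT ++ l := by
        rw [← hrep, List.drop_append_of_le_length (by simp [hkle]), List.drop_replicate]
      rw [hdrop, ih (run - k) (by omega) l hl]
      rw [pvBChunks_pos run cap hrun hcap]
      have hkc : min ((run : Nat) : Int) cap = (k : Int) := by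
        have : (0 : Int) ≤ min ((run : Nat) : Int) cap := by push_cast; omega
        omega
      rw [hkc]
      simp

lemma pvBCollapse_fold (cap : Int) (hcap : 1 ≤ cap) :
    ∀ (l : List (List Char)) (run : Nat) (out : List (List Char)),
      (let st := l.foldl
        (fun (st : Nat × List (List Char)) t =>
          if t = pvWaitT then (st.1 + 1, st.2)
          else (0, st.2 ++ pvBChunks st.1 cap ++ [t]))
        (run, out)
       st.2 ++ pvBChunks st.1 cap)
      = out ++ pvMid cap (List.replicate run pvWaitT ++ l) := by
  intro l
  induction l with
  | nil =>
    intro run out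
    simp only [List.foldl_nil]
    rw [pvMid_replicate cap hcap run [] (Or.inl rfl)]
    simp [pvMid]
  | cons t l ih =>
    intro run out
    by_cases ht : t = pvWaitT
    · simp only [List.foldl_cons, if_pos ht]
      rw [ih (run + 1) out]
      subst ht
      congr 2
      rw [List.replicate_succ']
      simp
    · simp only [List.foldl_cons, if_neg ht]
      rw [ih 0 _]
      rw [pvMid_replicate cap hcap run (t :: l) (Or.inr ⟨t, l, rfl, ht⟩)]
      simp only [List.replicate_zero, List.nil_append]
      have hm : pvMid cap (t :: l) = t :: pvMid cap l := by
        simp only [pvMid, if_neg ht]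
      rw [hm]
      simp [List.append_assoc]

lemma pvCollapse_eq (notes : List (List Char)) (sr : Int) (hsr : 1 ≤ sr) :
    pvACollapse notes sr 0 [] notes.length = pvBCollapse notes (2 * sr) := by
  have h0 : ((0 : Nat) : Int) = (0 : Int) := rfl
  have hA := pvACollapse_eq notes sr hsr notes.length 0 [] (by omega)
  rw [h0] at hA
  rw [hA]
  show pvJoin (pvMid (sr * 2) (notes.drop 0)) = pvBCollapse notes (2 * sr)
  have hB := pvBCollapse_fold (2 * sr) (by omega) notes 0 []
  simp only [List.replicate_zero, List.nil_append] at hB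
  unfold pvBCollapse
  show _ = pvJoin (_ ++ pvBChunks _ (2 * sr))
  rw [hB]
  rw [List.drop_zero, mul_comm sr 2]

-- ===== VERDICT (by name: the statement is the Claim_ definition above) =====
theorem chords_to_notes_spec : Claim_equal_chords_to_notes := by
  intro chords sample_rate _hdom hpre
  unfold Spec_chords_to_notes
  rcases chords with _ | ⟨c, cs⟩
  · show chords_to_notes [] sample_rate = chords_to_notes_alt [] sample_rate
    have hA : chords_to_notes [] sample_rate = String.ofList [] := rfl
    have hB : chords_to_notes_alt [] sample_rate
        = String.ofList ((([] ++ pvBChunks 0 (2 * sample_rate)).map (fun p => p ++ [' '])).flatten) := rfl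
    rw [hA, hB, pvBChunks_zero]
    rfl
  · have hsr : 1 ≤ sample_rate := hpre.1 (by simp)
    simp only [chords_to_notes, chords_to_notes_alt]
    rw [pvTokens_eq, pvCollapse_eq _ _ hsr]
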